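-- pv_equiv track=rewrite | github.com/johnding1996/Slurm-vLLM | slapi.py | get_short_model_name
-- ===== SOURCE A (Python) =====
-- def get_short_model_name(model_name):
--     """Create a short, readable version of model name."""
--     if not model_name:
--         return model_name
--
--     # First split by '/'
--     parts = []
--     for part in model_name.split("/"):
--         # Then split each part by '-'
--         if "-" in part:
--             subparts = []
--             for subpart in part.split("-"):
--                 # Truncate each subpart to 4 chars if longer
--                 if len(subpart) > 4:
--                     subparts.append(subpart[:4])
--                 else:
--                     subparts.append(subpart)
--             # Rejoin with original hyphens
--             parts.append("-".join(subparts))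
--         else:
--             # Handle parts with no hyphens
--             if len(part) > 4:
--                 parts.append(part[:4])
--             else:
--                 parts.append(part)
--
--     # Rejoin with original slashes
--     return "/".join(parts)
-- ===== SOURCE B (Python) =====
-- import re
--
--
-- def get_short_model_name(model_name):
--     """Create a short, readable version of model name."""
--     if not model_name:
--         return model_name
--     # One regex pass: truncate each maximal run of non-separator chars to 4.
--     return re.sub(r"[^/-]+", lambda m: m.group()[:4], model_name)
-- ===== Notes on version B (the rewrite author's own statement) =====
-- stated objective: idiomatic
-- what changed: Replaced the nested split-by-'/'/split-by-'-'/truncate/rejoin passes with a single regex scan that truncates each maximal run of non-separator characters to 4 chars in place.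
import Mathlib
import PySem

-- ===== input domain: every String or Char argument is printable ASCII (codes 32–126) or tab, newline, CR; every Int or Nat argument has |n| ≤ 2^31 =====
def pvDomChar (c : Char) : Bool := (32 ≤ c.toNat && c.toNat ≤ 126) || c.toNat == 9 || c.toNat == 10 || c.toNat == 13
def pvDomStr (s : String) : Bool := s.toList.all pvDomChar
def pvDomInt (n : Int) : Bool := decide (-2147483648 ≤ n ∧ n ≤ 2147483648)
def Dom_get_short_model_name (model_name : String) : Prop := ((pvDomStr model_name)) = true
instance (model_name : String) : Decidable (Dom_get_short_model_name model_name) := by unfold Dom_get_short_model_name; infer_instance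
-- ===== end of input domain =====

-- B replaces A's nested split/truncate/rejoin passes by a single left-to-right scan that
-- truncates each maximal run of non-'/'/'-' characters to its first 4 chars (re.sub in Source B).

-- ===== PORT A =====
-- truncate-a-subpart, as A writes it: subpart[:4] if len(subpart) > 4 else subpart
def pvTruncA (sub : List Char) : List Char :=
  if (sub.length : Int) > 4 then PySem.Chars.slice sub none (some 4) else sub

def get_short_model_name (model_name : String) : String :=
  if model_name = "" then model_name
  else
    let parts : List (List Char) :=
      (PySem.Chars.splitOn model_name.toList ['/']).foldl (fun parts part =>
        if PySem.Chars.isIn ['-'] part then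
          let subparts : List (List Char) :=
            (PySem.Chars.splitOn part ['-']).foldl (fun sp subpart =>
              sp ++ [pvTruncA subpart]) []
          parts ++ [PySem.Chars.join ['-'] subparts]
        else
          parts ++ [pvTruncA part]) []
    String.ofList (PySem.Chars.join ['/'] parts)

-- ===== PORT B =====
-- the single scan of Source B's regex substitution: k = number of chars already seen in the current run
def pvAltGo : Nat → List Char → List Char
  | _, [] => []
  | k, c :: rest =>
    if c = '/' ∨ c = '-' then c :: pvAltGo 0 rest
    else if k < 4 then c :: pvAltGo (k + 1) rest
    else pvAltGo (k + 1) rest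

def get_short_model_name_alt (model_name : String) : String :=
  if model_name = "" then model_name
  else String.ofList (pvAltGo 0 model_name.toList)

-- ===== PRECONDITION & SPEC =====
def Spec_get_short_model_name (model_name : String) (out : String) : Prop := out = get_short_model_name_alt model_name
instance (model_name : String) (out : String) : Decidable (Spec_get_short_model_name model_name out) := by unfold Spec_get_short_model_name; infer_instance

-- ===== CLAIM (what is proved, stated in full; the proofs are below) =====
def Claim_equal_get_short_model_name : Prop := ∀ (model_name : String), Dom_get_short_model_name model_name → Spec_get_short_model_name model_name (get_short_model_name model_name)

-- ===== LEMMAS AND PROOFS =====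

-- clean recursive characterisation of splitOn for a single-char separator
def pvSplit (d : Char) : List Char → List (List Char)
  | [] => [[]]
  | c :: rest => if c = d then [] :: pvSplit d rest else (pvSplit d rest).modifyHead (c :: ·)

theorem pvSplit_ne_nil (d : Char) (l : List Char) : pvSplit d l ≠ [] := by
  cases l with
  | nil => simp [pvSplit]
  | cons c rest =>
    simp only [pvSplit]
    split_ifs
    · simp
    · cases h : pvSplit d rest with
      | nil => exact absurd h (pvSplit_ne_nil d rest)
      | cons t ts => simp

theorem pvSplit_go (d : Char) (l : List Char) : ∀ (fuel : Nat) (cur : List Char) (acc : List (List Char)),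
    l.length < fuel →
    PySem.Chars.splitOn.go [d] fuel l cur acc =
      acc.reverse ++ (pvSplit d l).modifyHead (cur.reverse ++ ·) := by
  induction l with
  | nil =>
    intro fuel cur acc h
    cases fuel with
    | zero => omega
    | succ f => simp [PySem.Chars.splitOn.go, pvSplit]
  | cons c rest ih =>
    intro fuel cur acc h
    cases fuel with
    | zero => simp at h
    | succ f =>
      simp only [PySem.Chars.splitOn.go]
      by_cases hc : c = d
      · subst hc
        have hpre : List.isPrefixOf [c] (c :: rest) = true := by simp [List.isPrefixOf]
        rw [if_pos hpre]
        simp only [List.length_cons, List.length_nil, List.drop_succ_cons, List.drop_zero]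
        rw [ih f [] (cur.reverse :: acc) (by simpa using h)]
        cases hs : pvSplit c rest with
        | nil => exact absurd hs (pvSplit_ne_nil c rest)
        | cons t ts => simp [pvSplit, hs]
      · have hpre : List.isPrefixOf [d] (c :: rest) = false := by
          simp [List.isPrefixOf]; exact fun hh => (hc hh.symm).elim
        rw [if_neg (by simp [hpre])]
        rw [ih f (c :: cur) acc (by simpa using h)]
        cases hs : pvSplit d rest with
        | nil => exact absurd hs (pvSplit_ne_nil d rest)
        | cons t ts => simp [pvSplit, hc, hs]

theorem splitOn_eq_pvSplit (l : List Char) (d : Char) :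
    PySem.Chars.splitOn l [d] = pvSplit d l := by
  rw [PySem.Chars.splitOn, pvSplit_go d l (l.length + 1) [] [] (by omega)]
  cases hs : pvSplit d l with
  | nil => exact absurd hs (pvSplit_ne_nil d l)
  | cons t ts => simp

-- A's truncation is List.take 4
theorem pvTruncA_eq_take (sub : List Char) : pvTruncA sub = sub.take 4 := by
  unfold pvTruncA
  split_ifs with h
  · rw [PySem.Chars.slice, PySem.List.slice_to sub (by norm_num)]
    rfl
  · rw [List.take_of_length_le (by exact_mod_cast Int.not_lt.mp h)]

-- the '-'-level scan: B's scan restricted to a single '/'-part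
def pvIGo : Nat → List Char → List Char
  | _, [] => []
  | k, c :: rest =>
    if c = '-' then '-' :: pvIGo 0 rest
    else if k < 4 then c :: pvIGo (k + 1) rest
    else pvIGo (k + 1) rest

def pvJn (k : Nat) : List (List Char) → List Char
  | [] => []
  | t :: ts => t.take (4 - k) ++ ts.flatMap (fun t => '-' :: t.take 4)

theorem pvIGo_spec (l : List Char) : ∀ (k : Nat), pvIGo k l = pvJn k (pvSplit '-' l) := by
  induction l with
  | nil => intro k; simp [pvIGo, pvSplit, pvJn]
  | cons c rest ih =>
    intro k
    by_cases hc : c = '-'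
    · subst hc
      cases hs : pvSplit '-' rest with
      | nil => exact absurd hs (pvSplit_ne_nil _ _)
      | cons t ts =>
        simp only [pvIGo, pvSplit, ih 0, hs, pvJn]
        simp
    · cases hs : pvSplit '-' rest with
      | nil => exact absurd hs (pvSplit_ne_nil _ _)
      | cons t ts =>
        simp only [pvIGo, pvSplit, if_neg hc, ih (k + 1), hs, pvJn, List.modifyHead]
        by_cases hk : k < 4
        · rw [if_pos hk]
          have : 4 - k = (4 - (k + 1)) + 1 := by omega
          rw [this, List.take_succ_cons]
          simp
        · rw [if_neg hk]
          have h1 : 4 - k = 0 := by omega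
          have h2 : 4 - (k + 1) = 0 := by omega
          simp [h1, h2]

def pvJn2 (k : Nat) : List (List Char) → List Char
  | [] => []
  | t :: ts => pvIGo k t ++ ts.flatMap (fun t => '/' :: pvIGo 0 t)

theorem pvAltGo_spec (l : List Char) : ∀ (k : Nat), pvAltGo k l = pvJn2 k (pvSplit '/' l) := by
  induction l with
  | nil => intro k; simp [pvAltGo, pvSplit, pvJn2, pvIGo]
  | cons c rest ih =>
    intro k
    by_cases hc : c = '/'
    · subst hc
      cases hs : pvSplit '/' rest with
      | nil => exact absurd hs (pvSplit_ne_nil _ _)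
      | cons t ts =>
        simp only [pvAltGo, pvSplit, ih 0, hs, pvJn2]
        simp [pvIGo]
    · cases hs : pvSplit '/' rest with
      | nil => exact absurd hs (pvSplit_ne_nil _ _)
      | cons t ts =>
        simp only [pvAltGo, pvSplit, if_neg hc, ih (k + 1), hs, pvJn2, List.modifyHead]
        by_cases hd : c = '-'
        · subst hd
          simp [pvIGo, pvJn2, ih 0, hs]
        · rw [if_neg (by simp [hc, hd])]
          by_cases hk : k < 4
          · simp [pvIGo, hd, hk]
          · simp [pvIGo, hd, hk]

theorem no_dash_split (part : List Char) (h : '-' ∉ part) : pvSplit '-' part = [part] := by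
  induction part with
  | nil => rfl
  | cons c rest ih =>
    simp only [List.mem_cons, not_or] at h
    simp only [pvSplit]
    rw [if_neg (fun hh => h.1 hh.symm), ih h.2]
    rfl

theorem pvJoin_char (d : Char) (ts : List (List Char)) : ∀ (t : List Char),
    PySem.Chars.join [d] (t :: ts) = t ++ ts.flatMap (fun u => d :: u) := by
  induction ts with
  | nil => intro t; simp [PySem.Chars.join, List.intercalate]
  | cons b bs ih =>
    intro t
    have : PySem.Chars.join [d] (t :: b :: bs) = t ++ [d] ++ PySem.Chars.join [d] (b :: bs) := by
      simp [PySem.Chars.join, List.intercalate]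
    rw [this, ih b]
    simp

theorem infix_singleton_of_mem {c : Char} {l : List Char} (h : c ∈ l) : [c] <:+: l := by
  obtain ⟨s, t, rfl⟩ := List.append_of_mem h
  exact ⟨s, t, by simp⟩

-- the processing A applies to one '/'-part equals B's inner scan
theorem part_eq_iGo (part : List Char) :
    (if PySem.Chars.isIn ['-'] part then
      PySem.Chars.join ['-']
        ((PySem.Chars.splitOn part ['-']).foldl (fun sp subpart => sp ++ [pvTruncA subpart]) [])
    else pvTruncA part) = pvIGo 0 part := by
  have hfold : ∀ xs : List (List Char),
      xs.foldl (fun sp subpart => sp ++ [pvTruncA subpart]) [] = xs.map pvTruncA :=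
    fun xs => by simpa using PySem.List.foldl_append_singleton_eq_map pvTruncA xs []
  rw [pvIGo_spec part 0]
  by_cases hin : PySem.Chars.isIn ['-'] part
  · rw [if_pos hin, hfold, splitOn_eq_pvSplit]
    cases hs : pvSplit '-' part with
    | nil => exact absurd hs (pvSplit_ne_nil _ _)
    | cons t ts =>
      rw [List.map_cons, pvJoin_char]
      simp [pvJn, pvTruncA_eq_take, List.flatMap_map]
  · rw [if_neg hin]
    have hnot : '-' ∉ part := by
      intro hmem
      exact hin ((PySem.Chars.isIn_iff_infix ['-'] part).mpr (infix_singleton_of_mem hmem))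
    rw [no_dash_split part hnot]
    simp [pvJn, pvTruncA_eq_take]

theorem main_lists (l : List Char) :
    PySem.Chars.join ['/']
      ((PySem.Chars.splitOn l ['/']).foldl (fun parts part =>
        if PySem.Chars.isIn ['-'] part then
          parts ++ [PySem.Chars.join ['-']
            ((PySem.Chars.splitOn part ['-']).foldl (fun sp subpart => sp ++ [pvTruncA subpart]) [])]
        else parts ++ [pvTruncA part]) []) = pvAltGo 0 l := by
  have hfun : (fun (parts : List (List Char)) part =>
      if PySem.Chars.isIn ['-'] part then
        parts ++ [PySem.Chars.join ['-']
          ((PySem.Chars.splitOn part ['-']).foldl (fun sp subpart => sp ++ [pvTruncA subpart]) [])]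
      else parts ++ [pvTruncA part]) =
      (fun parts part => parts ++ [pvIGo 0 part]) := by
    funext parts part
    rw [← part_eq_iGo part]
    split_ifs <;> rfl
  rw [hfun, PySem.List.foldl_append_singleton_eq_map (pvIGo 0) _ [], splitOn_eq_pvSplit,
    pvAltGo_spec]
  cases hs : pvSplit '/' l with
  | nil => exact absurd hs (pvSplit_ne_nil _ _)
  | cons t ts =>
    simp only [List.nil_append, List.map_cons]
    rw [show (pvIGo 0 t :: List.map (pvIGo 0) ts) = (pvIGo 0 t) :: List.map (pvIGo 0) ts from rfl,
      pvJoin_char]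
    simp [pvJn2, List.flatMap_map]

-- ===== VERDICT (by name: the statement is the Claim_ definition above) =====
theorem get_short_model_name_spec : Claim_equal_get_short_model_name := by
  intro s _
  unfold Spec_get_short_model_name get_short_model_name get_short_model_name_alt
  split_ifs with h
  · rfl
  · exact congrArg String.ofList (main_lists s.toList)
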